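-- pv_equiv track=rewrite | github.com/tushartushar/designite_util | model.py | common_substring_from_start
-- ===== SOURCE A (Python) =====
-- def common_substring_from_start(str_a, str_b):
--     """ returns the longest common substring from the beginning of str_a and str_b """
--
--     def _iter():
--         for a, b in zip(str_a, str_b):
--             if a == b:
--                 yield a
--                 if a == ':' or b == ':':
--                     return
--             else:
--                 return
--
--     return ''.join(_iter())
-- ===== SOURCE B (Python) =====
-- def common_substring_from_start(str_a, str_b):
--     """ returns the longest common substring from the beginning of str_a and str_b """
--     prefix = []
--     for a, b in zip(str_a, str_b):
--         if a != b:
--             break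
--         prefix.append(a)
--     head, sep, _ = ''.join(prefix).partition(':')
--     return head + sep
-- ===== Notes on version B (the rewrite author's own statement) =====
-- stated objective: alternative
-- what changed: A's single fused scan that early-exits at a mismatch or inclusively at ':' is replaced by two separate passes: first compute the plain longest common prefix (ignoring colons), then truncate it inclusively at its first ':' via str.partition.
import Mathlib
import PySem

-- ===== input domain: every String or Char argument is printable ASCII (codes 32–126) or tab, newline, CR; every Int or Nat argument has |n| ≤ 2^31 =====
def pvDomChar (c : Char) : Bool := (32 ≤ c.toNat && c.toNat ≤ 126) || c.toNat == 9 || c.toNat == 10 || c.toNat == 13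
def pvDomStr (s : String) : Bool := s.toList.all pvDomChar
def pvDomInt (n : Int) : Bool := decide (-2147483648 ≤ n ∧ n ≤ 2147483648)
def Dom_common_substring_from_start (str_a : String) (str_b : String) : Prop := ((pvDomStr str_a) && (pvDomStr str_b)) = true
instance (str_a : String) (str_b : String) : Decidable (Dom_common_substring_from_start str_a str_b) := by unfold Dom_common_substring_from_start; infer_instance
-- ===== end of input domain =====

-- B replaces A's single fused scan (early exit at mismatch or inclusively at ':') by two passes:
-- plain longest common prefix first, then inclusive truncation at the first ':' (partition). Objective: alternative.

-- ===== PORT A =====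
-- A's generator _iter over zip(str_a, str_b): yield matching chars, stop after yielding a ':'
def pvAIter : List Char → List Char → List Char
  | a :: as, b :: bs =>
      if a = b then
        if a = ':' ∨ b = ':' then [a] else a :: pvAIter as bs
      else []
  | _, _ => []

def common_substring_from_start (str_a : String) (str_b : String) : String :=
  String.mk (pvAIter str_a.toList str_b.toList)

-- ===== PORT B =====
-- pass 1: plain longest common prefix of the zipped chars (break at first mismatch)
def pvLcp : List Char → List Char → List Char
  | a :: as, b :: bs => if a ≠ b then [] else a :: pvLcp as bs
  | _, _ => []

-- pass 2: head + sep of partition(':') — everything up to and including the first ':'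
def pvCutColon : List Char → List Char
  | [] => []
  | c :: cs => if c = ':' then [':'] else c :: pvCutColon cs

def common_substring_from_start_alt (str_a : String) (str_b : String) : String :=
  String.mk (pvCutColon (pvLcp str_a.toList str_b.toList))

-- ===== PRECONDITION & SPEC =====
def Spec_common_substring_from_start (str_a : String) (str_b : String) (out : String) : Prop := out = common_substring_from_start_alt str_a str_b
instance (str_a : String) (str_b : String) (out : String) : Decidable (Spec_common_substring_from_start str_a str_b out) := by unfold Spec_common_substring_from_start; infer_instance

-- ===== CLAIM (what is proved, stated in full; the proofs are below) =====
def Claim_equal_common_substring_from_start : Prop := ∀ (str_a : String) (str_b : String), Dom_common_substring_from_start str_a str_b → Spec_common_substring_from_start str_a str_b (common_substring_from_start str_a str_b)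

-- ===== LEMMAS AND PROOFS =====
theorem pvAIter_eq_cut_lcp (as : List Char) (bs : List Char) :
    pvAIter as bs = pvCutColon (pvLcp as bs) := by
  induction as generalizing bs with
  | nil => cases bs <;> simp [pvAIter, pvLcp, pvCutColon]
  | cons a as ih =>
      cases bs with
      | nil => simp [pvAIter, pvLcp, pvCutColon]
      | cons b bs =>
          by_cases hab : a = b
          · subst hab
            by_cases hc : a = ':'
            · simp [pvAIter, pvLcp, pvCutColon, hc]
            · simp [pvAIter, pvLcp, pvCutColon, hc, ih]
          · simp [pvAIter, pvLcp, pvCutColon, hab]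

-- ===== VERDICT (by name: the statement is the Claim_ definition above) =====
theorem common_substring_from_start_spec : Claim_equal_common_substring_from_start := by
  intro str_a str_b _
  unfold Spec_common_substring_from_start common_substring_from_start common_substring_from_start_alt
  rw [pvAIter_eq_cut_lcp]
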